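-- pv_equiv track=rewrite | github.com/alexandraback/datacollection | solutions_5670465267826688_0/Python/Sean223/C-solution.py | solve
-- ===== SOURCE A (Python) =====
-- table = {('1', '1'): '1', ('1', 'i'): 'i', ('1', 'j'): 'j', ('1', 'k'): 'k',
--          ('i', '1'): 'i', ('i', 'i'): '-1', ('i', 'j'): 'k', ('i', 'k'): '-j',
--          ('j', '1'): 'j', ('j', 'i'): '-k', ('j', 'j'): '-1', ('j', 'k'): 'i',
--          ('k', '1'): 'k', ('k', 'i'): 'j', ('k', 'j'): '-i', ('k', 'k'): '-1'}
--
-- def solve(expression):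
--     first_i = None
--     first_k = None
--     total = '1'
--     positive = True
--
--     for i in range(len(expression)):
--         total = table[(total, expression[i])]
--         if total[0] == '-':
--             total = total[1]
--             positive = not positive
--         if total == 'i' and positive and first_i is None:
--             first_i = i
--
--     if total == '1' and not positive and first_i is not None:
--         back_total = '1'
--         back_positive = True
--         for i in reversed(range(len(expression))):
--             back_total = table[(expression[i], back_total)]
--             if back_total[0] == '-':
--                 back_total = back_total[1]
--                 back_positive = not back_positive
--             if back_total == 'k' and back_positive and first_k is None:
--                 first_k = i
--                 break
--
--     if first_k is not None and first_k > first_i+1: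
--         return True
--
--     return False
-- ===== SOURCE B (Python) =====
-- table = {('1', '1'): '1', ('1', 'i'): 'i', ('1', 'j'): 'j', ('1', 'k'): 'k',
--          ('i', '1'): 'i', ('i', 'i'): '-1', ('i', 'j'): 'k', ('i', 'k'): '-j',
--          ('j', '1'): 'j', ('j', 'i'): '-k', ('j', 'j'): '-1', ('j', 'k'): 'i',
--          ('k', '1'): 'k', ('k', 'i'): 'j', ('k', 'j'): '-i', ('k', 'k'): '-1'}
--
--
-- def solve(expression):
--     # One forward pass records every prefix product; the whole answer is then
--     # read off that array, with no second (backward) quaternion pass.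
--     states = [('1', True)]
--     ax, pos = '1', True
--     for ch in expression:
--         t = table[(ax, ch)]
--         if t[0] == '-':
--             ax, pos = t[1], not pos
--         else:
--             ax = t
--         states.append((ax, pos))
--     n = len(expression)
--     if states[n] != ('1', False):
--         return False
--     pi = None
--     for m in range(n + 1):
--         if states[m] == ('i', True):
--             pi = m
--             break
--     if pi is None:
--         return False
--     for m in range(n - 1, -1, -1):
--         if states[m] == ('k', True):
--             return m > pi
--     return False
-- ===== Notes on version B (the rewrite author's own statement) =====
-- stated objective: alternative
-- what changed: B records all prefix quaternion products in one forward pass and reads the answer off that array (last product, first positive-i prefix, last positive-k prefix), eliminating A's second backward quaternion-multiplication pass.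
import Mathlib
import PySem

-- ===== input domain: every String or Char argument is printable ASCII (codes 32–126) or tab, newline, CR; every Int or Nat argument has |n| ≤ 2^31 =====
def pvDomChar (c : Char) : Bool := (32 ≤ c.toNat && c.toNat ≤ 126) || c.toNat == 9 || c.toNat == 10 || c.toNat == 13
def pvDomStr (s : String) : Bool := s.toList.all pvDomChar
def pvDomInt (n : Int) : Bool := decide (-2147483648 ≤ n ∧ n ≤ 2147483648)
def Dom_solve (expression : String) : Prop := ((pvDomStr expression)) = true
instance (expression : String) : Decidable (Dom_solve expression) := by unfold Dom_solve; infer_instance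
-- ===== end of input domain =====

-- B replaces A's second backward quaternion-multiplication pass by one forward pass that
-- records all prefix products and then reads the answer off that array (objective: alternative).
-- Python str values ('1','i','-k',…) are ported as List Char per the PySem convention.

-- ===== PORT A =====

-- the module-level quaternion multiplication table (shared by both Pythons)
def table : PySem.Dict (List Char × List Char) (List Char) :=
  PySem.Dict.ofList
    [((['1'], ['1']), ['1']), ((['1'], ['i']), ['i']), ((['1'], ['j']), ['j']), ((['1'], ['k']), ['k']),
     ((['i'], ['1']), ['i']), ((['i'], ['i']), ['-','1']), ((['i'], ['j']), ['k']), ((['i'], ['k']), ['-','j']),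
     ((['j'], ['1']), ['j']), ((['j'], ['i']), ['-','k']), ((['j'], ['j']), ['-','1']), ((['j'], ['k']), ['i']),
     ((['k'], ['1']), ['k']), ((['k'], ['i']), ['j']), ((['k'], ['j']), ['-','i']), ((['k'], ['k']), ['-','1'])]

-- A's inline sign handling: `if total[0] == '-': total = total[1]; positive = not positive`
def stripSign (t : List Char) (pos : Bool) : List Char × Bool :=
  if PySem.Chars.pyGet? t 0 = some '-' then
    (((PySem.Chars.pyGet? t 1).map (fun ch => [ch])).getD [], !pos)
  else (t, pos)

-- A's first loop; `none` result = KeyError (excluded by Pre_solve)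
def solveFwd : List Char → Int → Option Int → List Char → Bool →
    Option (Option Int × List Char × Bool)
  | [], _, fi, total, pos => some (fi, total, pos)
  | c :: cs, i, fi, total, pos =>
    match table.get? (total, [c]) with
    | none => none
    | some t =>
      let tp := stripSign t pos
      let fi' := if tp.1 = ['i'] ∧ tp.2 = true ∧ fi = none then some i else fi
      solveFwd cs (i + 1) fi' tp.1 tp.2

-- A's second loop over `reversed(range(len(expression)))`, with the `break`
def solveBwd : List Char → Int → List Char → Bool → Option (Option Int)
  | [], _, _, _ => some none
  | c :: cs, i, bt, bp =>
    match table.get? ([c], bt) with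
    | none => none
    | some t =>
      let tp := stripSign t bp
      if tp.1 = ['k'] ∧ tp.2 = true then some (some i)
      else solveBwd cs (i - 1) tp.1 tp.2

def solve (expression : String) : Bool :=
  match solveFwd expression.toList 0 none ['1'] true with
  | none => false  -- KeyError: outside Pre_solve
  | some (fi, total, pos) =>
    let fk : Option (Option Int) :=
      if total = ['1'] ∧ pos = false ∧ fi ≠ none then
        solveBwd expression.toList.reverse ((expression.toList.length : Int) - 1) ['1'] true
      else some none
    match fk, fi with
    | some (some k), some ii => decide (k > ii + 1)
    | _, _ => false  -- also covers the KeyError `none` (unreachable under Pre_solve)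

-- ===== PORT B =====

-- B's inline sign handling (Source B writes it with an explicit else branch)
def bNorm (t : List Char) (pos : Bool) : List Char × Bool :=
  if PySem.Chars.pyGet? t 0 = some '-' then
    ((PySem.Chars.pyGet? t 1).elim [] (fun ch => [ch]), !pos)
  else (t, pos)

-- the single multiplication pass of Source B, collecting every prefix product;
-- `none` result = KeyError (excluded by Pre_solve)
def buildStates : List Char → List Char → Bool → Option (List (List Char × Bool))
  | [], _, _ => some []
  | ch :: rest, ax, pos =>
    match table.get? (ax, [ch]) with
    | none => none
    | some t =>
      let st := bNorm t pos
      (buildStates rest st.1 st.2).map (st :: ·)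

-- Source B's `for m in range(n+1): if states[m] == ('i', True): pi = m; break`
def firstI : List (List Char × Bool) → Nat → Option Nat
  | [], _ => none
  | s :: ss, m => if s = (['i'], true) then some m else firstI ss (m + 1)

-- Source B's `for m in range(n-1, -1, -1): if states[m] == ('k', True): return m > pi`
def lastScan : List (List Char × Bool) → Nat → Nat → Bool
  | [], _, _ => false
  | s :: ss, m, pi => if s = (['k'], true) then decide (m > pi) else lastScan ss (m - 1) pi

def solve_alt (expression : String) : Bool :=
  match buildStates expression.toList ['1'] true with
  | none => false  -- KeyError: outside Pre_solve
  | some tl =>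
    let states := (['1'], true) :: tl
    let n := expression.toList.length
    if states.getD n (['1'], true) ≠ (['1'], false) then false
    else
      match firstI states 0 with
      | none => false
      | some pi => lastScan states.dropLast.reverse (n - 1) pi

-- ===== PRECONDITION & SPEC =====

-- Pre_solve excludes exactly the strings containing a character outside the quaternion
-- alphabet (the table's keys), on which A raises KeyError in the table lookup.
def Pre_solve (expression : String) : Prop :=
  (expression.toList.all (fun c => c == '1' || c == 'i' || c == 'j' || c == 'k')) = true
instance (expression : String) : Decidable (Pre_solve expression) := by
  unfold Pre_solve; infer_instance

def pvWitness_solve : String := "ijk"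

def Spec_solve (expression : String) (out : Bool) : Prop := out = solve_alt expression
instance (expression : String) (out : Bool) : Decidable (Spec_solve expression out) := by
  unfold Spec_solve; infer_instance

-- ===== CLAIM (what is proved, stated in full; the proofs are below) =====
def Claim_equal_solve : Prop :=
  ∀ (expression : String), Dom_solve expression → Pre_solve expression →
    Spec_solve expression (solve expression)

-- ===== LEMMAS AND PROOFS =====

-- the eight valid signed quaternion units, as (axis, positive)
def qV : List (List Char × Bool) :=
  [(['1'], true), (['i'], true), (['j'], true), (['k'], true),
   (['1'], false), (['i'], false), (['j'], false), (['k'], false)]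

def qc (c : Char) : List Char × Bool := ([c], true)

-- quaternion multiplication on signed states
def qmul (a b : List Char × Bool) : List Char × Bool :=
  let p : List Char × Bool :=
    match a.1, b.1 with
    | ['1'], x => (x, true)
    | x, ['1'] => (x, true)
    | ['i'], ['i'] => (['1'], false) | ['i'], ['j'] => (['k'], true)  | ['i'], ['k'] => (['j'], false)
    | ['j'], ['i'] => (['k'], false) | ['j'], ['j'] => (['1'], false) | ['j'], ['k'] => (['i'], true)
    | ['k'], ['i'] => (['j'], true)  | ['k'], ['j'] => (['i'], false) | ['k'], ['k'] => (['1'], false)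
    | _, _ => (['1'], true)
  (p.1, (a.2 == b.2) == p.2)

-- prefix product of a char list starting from state a
def pf (l : List Char) (a : List Char × Bool) : List Char × Bool :=
  l.foldl (fun s c => qmul s (qc c)) a

-- the list of successive prefix products (excluding the start state)
def scanQ : List Char → (List Char × Bool) → List (List Char × Bool)
  | [], _ => []
  | c :: t, a => qmul a (qc c) :: scanQ t (qmul a (qc c))

-- index of the first (+i) state
def fIdx : List (List Char × Bool) → Option Nat
  | [] => none
  | s :: ss => if s = (['i'], true) then some 0 else (fIdx ss).map (· + 1)

theorem qc_mem : ∀ c ∈ ['1','i','j','k'], qc c ∈ qV := by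
  intro c hc
  fin_cases hc <;> decide

theorem qmul_mem : ∀ a ∈ qV, ∀ b ∈ qV, qmul a b ∈ qV := by decide

theorem qmul_assoc' : ∀ a ∈ qV, ∀ b ∈ qV, ∀ c ∈ qV,
    qmul (qmul a b) c = qmul a (qmul b c) := by decide

theorem qmul_one : ∀ a ∈ qV, qmul a (['1'], true) = a := by decide

theorem qmul_k_right : ∀ a ∈ qV,
    (qmul a (['k'], true) = (['1'], false) ↔ a = (['k'], true)) := by decide

theorem qmul_k_left : ∀ b ∈ qV,
    (qmul (['k'], true) b = (['1'], false) ↔ b = (['k'], true)) := by decide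

theorem stepA : ∀ a ∈ qV, ∀ c ∈ ['1','i','j','k'],
    (table.get? (a.1, [c])).map (fun t => stripSign t a.2) = some (qmul a (qc c)) := by
  intro a ha c hc
  fin_cases ha <;> fin_cases hc <;> decide

theorem stepB : ∀ a ∈ qV, ∀ c ∈ ['1','i','j','k'],
    (table.get? (a.1, [c])).map (fun t => bNorm t a.2) = some (qmul a (qc c)) := by
  intro a ha c hc
  fin_cases ha <;> fin_cases hc <;> decide

theorem stepBwd : ∀ b ∈ qV, ∀ c ∈ ['1','i','j','k'],
    (table.get? ([c], b.1)).map (fun t => stripSign t b.2) = some (qmul (qc c) b) := by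
  intro b hb c hc
  fin_cases hb <;> fin_cases hc <;> decide

theorem pf_cons (c : Char) (l : List Char) (a : List Char × Bool) :
    pf (c :: l) a = pf l (qmul a (qc c)) := rfl

theorem pf_snoc (l : List Char) (c : Char) (a : List Char × Bool) :
    pf (l ++ [c]) a = qmul (pf l a) (qc c) := by
  simp [pf, List.foldl_append]

theorem pf_mem : ∀ (l : List Char), (∀ c ∈ l, c ∈ ['1','i','j','k']) →
    ∀ a ∈ qV, pf l a ∈ qV := by
  intro l
  induction l with
  | nil => intro _ a ha; exact ha
  | cons c t ih =>
    intro h a ha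
    rw [pf_cons]
    exact ih (fun x hx => h x (List.mem_cons_of_mem _ hx))
      _ (qmul_mem a ha _ (qc_mem c (h c (List.mem_cons_self))))

theorem scanQ_snoc : ∀ (l : List Char) (c : Char) (a : List Char × Bool),
    scanQ (l ++ [c]) a = scanQ l a ++ [qmul (pf l a) (qc c)] := by
  intro l
  induction l with
  | nil => intro c a; rfl
  | cons d t ih => intro c a; simp [scanQ, ih, pf_cons]

theorem scanQ_getLast? : ∀ (l : List Char) (a : List Char × Bool),
    (a :: scanQ l a).getLast? = some (pf l a) := by
  intro l
  induction l with
  | nil => intro a; rfl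
  | cons c t ih =>
    intro a
    have := ih (qmul a (qc c))
    simpa [scanQ, pf_cons, List.getLast?_cons] using this

theorem getD_states : ∀ (l : List Char) (a d : List Char × Bool),
    (a :: scanQ l a).getD l.length d = pf l a := by
  intro l
  induction l with
  | nil => intro a d; rfl
  | cons c t ih => intro a d; simpa [scanQ] using ih (qmul a (qc c)) d

-- a nonempty list is its last element consed onto the reverse of its dropLast, reversed
theorem rev_decomp {α : Type} (l : List α) (x : α) (h : l.getLast? = some x) :
    l.reverse = x :: l.dropLast.reverse := by
  have hne : l ≠ [] := by rintro rfl; simp at h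
  have h2 : l.dropLast ++ [l.getLast hne] = l := List.dropLast_append_getLast hne
  have hx : l.getLast hne = x := by
    have h3 : some x = some (l.getLast hne) := by
      rw [← h, List.getLast?_eq_some_getLast]
    exact ((Option.some.injEq _ _).mp h3).symm
  conv_lhs => rw [← h2]
  simp [hx]

theorem fwd_some : ∀ (l : List Char), (∀ c ∈ l, c ∈ ['1','i','j','k']) →
    ∀ a ∈ qV, ∀ (i v : Int),
    solveFwd l i (some v) a.1 a.2 = some (some v, pf l a) := by
  intro l
  induction l with
  | nil => intro _ a _ i v; rfl
  | cons c t ih =>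
    intro h a ha i v
    have hc : c ∈ ['1','i','j','k'] := h c List.mem_cons_self
    have hstep := stepA a ha c hc
    cases hg : table.get? (a.1, [c]) with
    | none => rw [hg] at hstep; simp at hstep
    | some tt =>
      rw [hg] at hstep
      have hst : stripSign tt a.2 = qmul a (qc c) := by simpa using hstep
      simp only [solveFwd, hg, hst]
      have : (if (qmul a (qc c)).1 = ['i'] ∧ (qmul a (qc c)).2 = true ∧
          (some v : Option Int) = none then some i else some v) = some v := by simp
      rw [this]
      rw [ih (fun x hx => h x (List.mem_cons_of_mem _ hx)) _
        (qmul_mem a ha _ (qc_mem c hc)) (i + 1) v]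
      rfl

theorem fwd_none : ∀ (l : List Char), (∀ c ∈ l, c ∈ ['1','i','j','k']) →
    ∀ a ∈ qV, ∀ (i : Int),
    solveFwd l i none a.1 a.2 =
      some ((fIdx (scanQ l a)).map (fun m => i + (m : Int)), pf l a) := by
  intro l
  induction l with
  | nil => intro _ a _ i; rfl
  | cons c t ih =>
    intro h a ha i
    have hc : c ∈ ['1','i','j','k'] := h c List.mem_cons_self
    have ht : ∀ x ∈ t, x ∈ ['1','i','j','k'] := fun x hx => h x (List.mem_cons_of_mem _ hx)
    have ha' : qmul a (qc c) ∈ qV := qmul_mem a ha _ (qc_mem c hc)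
    have hstep := stepA a ha c hc
    cases hg : table.get? (a.1, [c]) with
    | none => rw [hg] at hstep; simp at hstep
    | some tt =>
      rw [hg] at hstep
      have hst : stripSign tt a.2 = qmul a (qc c) := by simpa using hstep
      simp only [solveFwd, hg, hst]
      by_cases hI : qmul a (qc c) = (['i'], true)
      · split_ifs with hcnd
        · rw [fwd_some t ht _ ha' (i + 1) i]
          simp [scanQ, fIdx, hI, pf_cons]
        · exfalso
          apply hcnd
          rw [hI]
          exact ⟨rfl, rfl, by trivial⟩
      · split_ifs with hcnd
        · exact absurd (Prod.ext hcnd.1 hcnd.2.1) hI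
        · rw [ih ht _ ha' (i + 1)]
          have hfx : fIdx (scanQ (c :: t) a) = (fIdx (scanQ t (qmul a (qc c)))).map (· + 1) := by
            simp [scanQ, fIdx, hI]
          rw [hfx, pf_cons]
          cases fIdx (scanQ t (qmul a (qc c))) with
          | none => rfl
          | some m => simp; omega

theorem build_eq : ∀ (l : List Char), (∀ c ∈ l, c ∈ ['1','i','j','k']) →
    ∀ a ∈ qV, buildStates l a.1 a.2 = some (scanQ l a) := by
  intro l
  induction l with
  | nil => intro _ a _; rfl
  | cons c t ih =>
    intro h a ha
    have hc : c ∈ ['1','i','j','k'] := h c List.mem_cons_self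
    have hstep := stepB a ha c hc
    cases hg : table.get? (a.1, [c]) with
    | none => rw [hg] at hstep; simp at hstep
    | some tt =>
      rw [hg] at hstep
      have hst : bNorm tt a.2 = qmul a (qc c) := by simpa using hstep
      simp only [buildStates, hg, hst]
      rw [ih (fun x hx => h x (List.mem_cons_of_mem _ hx)) _ (qmul_mem a ha _ (qc_mem c hc))]
      rfl

theorem firstI_eq : ∀ (l : List (List Char × Bool)) (m : Nat),
    firstI l m = (fIdx l).map (fun r => m + r) := by
  intro l
  induction l with
  | nil => intro m; rfl
  | cons s ss ih =>
    intro m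
    by_cases hs : s = (['i'], true)
    · simp [firstI, fIdx, hs]
    · rw [show firstI (s :: ss) m = firstI ss (m + 1) by simp [firstI, hs],
        show fIdx (s :: ss) = (fIdx ss).map (· + 1) by simp [fIdx, hs], ih]
      cases fIdx ss with
      | none => rfl
      | some r => simp; omega

-- A's final `if first_k is not None and first_k > first_i+1` given first_i = some fi
def matchA (r : Option (Option Int)) (fi : Int) : Bool :=
  match r with
  | some (some k) => decide (k > fi + 1)
  | _ => false

-- the backward pass of A agrees with B's descending scan of the stored prefix products
theorem bw : ∀ (cs : List Char), (∀ c ∈ cs, c ∈ ['1','i','j','k']) →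
    ∀ a ∈ qV, ∀ b ∈ qV,
    qmul (pf cs a) b = (['1'], false) →
    ∀ (iA : Int) (mB : Nat) (fi : Int) (pi : Nat),
      (cs ≠ [] → iA = (mB : Int)) →
      cs.length ≤ mB + 1 →
      (pi : Int) = fi + 1 →
      matchA (solveBwd cs.reverse iA b.1 b.2) fi
        = lastScan ((a :: scanQ cs a).dropLast).reverse mB pi := by
  intro cs
  induction cs using List.reverseRecOn with
  | nil =>
    intro _ a _ b _ _ iA mB fi pi _ _ _
    rfl
  | append_singleton ds c ih =>
    intro hv a ha b hb hprod iA mB fi pi hIdx hlen hpi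
    have hc : c ∈ ['1','i','j','k'] := hv c (by simp)
    have hds : ∀ x ∈ ds, x ∈ ['1','i','j','k'] := fun x hx => hv x (by simp [hx])
    have hP : pf ds a ∈ qV := pf_mem ds hds a ha
    have hb' : qmul (qc c) b ∈ qV := qmul_mem _ (qc_mem c hc) b hb
    have hprod' : qmul (pf ds a) (qmul (qc c) b) = (['1'], false) := by
      rw [← qmul_assoc' _ hP _ (qc_mem c hc) _ hb, ← pf_snoc]
      exact hprod
    -- peel the last char on the A side
    have hrev : (ds ++ [c]).reverse = c :: ds.reverse := by simp
    have hstep := stepBwd b hb c hc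
    -- rewrite the B-side list
    have hlist : ((a :: scanQ (ds ++ [c]) a).dropLast).reverse = (a :: scanQ ds a).reverse := by
      rw [scanQ_snoc]
      rw [show a :: (scanQ ds a ++ [qmul (pf ds a) (qc c)]) =
        (a :: scanQ ds a) ++ [qmul (pf ds a) (qc c)] from rfl]
      rw [List.dropLast_concat]
    have hpeel : (a :: scanQ ds a).reverse =
        pf ds a :: ((a :: scanQ ds a).dropLast).reverse :=
      rev_decomp _ _ (scanQ_getLast? ds a)
    rw [hrev, hlist, hpeel]
    cases hg : table.get? ([c], b.1) with
    | none => rw [hg] at hstep; simp at hstep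
    | some tt =>
      rw [hg] at hstep
      have hst : stripSign tt b.2 = qmul (qc c) b := by simpa using hstep
      simp only [solveBwd, hg, hst]
      have hne : ds ++ [c] ≠ [] := by simp
      have hiA : iA = (mB : Int) := hIdx hne
      have hlen' : ds.length ≤ mB := by
        have := hlen; simp at this; omega
      by_cases hk : qmul (qc c) b = (['k'], true)
      · -- hit: A returns index iA; B's head is (+k) too
        have hcond : ((qmul (qc c) b).1 = ['k'] ∧ (qmul (qc c) b).2 = true) := by
          rw [hk]; exact ⟨rfl, rfl⟩
        rw [if_pos hcond]
        have hPk : pf ds a = (['k'], true) := by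
          rw [hk] at hprod'
          exact (qmul_k_right _ hP).mp hprod'
        rw [show lastScan (pf ds a :: ((a :: scanQ ds a).dropLast).reverse) mB pi =
          decide (mB > pi) by simp [lastScan, hPk]]
        show decide (iA > fi + 1) = decide (mB > pi)
        exact decide_eq_decide.mpr (by omega)
      · have hcond : ¬ ((qmul (qc c) b).1 = ['k'] ∧ (qmul (qc c) b).2 = true) := by
          intro ⟨h1, h2⟩
          exact hk (Prod.ext h1 h2)
        rw [if_neg hcond]
        have hPk : pf ds a ≠ (['k'], true) := by
          intro hEq
          rw [hEq] at hprod'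
          exact hk ((qmul_k_left _ hb').mp hprod')
        rw [show lastScan (pf ds a :: ((a :: scanQ ds a).dropLast).reverse) mB pi =
          lastScan ((a :: scanQ ds a).dropLast).reverse (mB - 1) pi by simp [lastScan, hPk]]
        refine ih hds a ha _ hb' hprod' (iA - 1) (mB - 1) fi pi ?_ ?_ hpi
        · intro hdsne
          have h1 := List.length_pos_iff.mpr hdsne
          omega
        · omega

theorem solve_spec_aux : ∀ (expression : String), Pre_solve expression →
    solve expression = solve_alt expression := by
  intro expression hpre0
  have hpre : ∀ c ∈ expression.toList, c ∈ ['1', 'i', 'j', 'k'] := by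
    intro c hc
    have h2 := List.all_eq_true.mp hpre0 c hc
    simp only [Bool.or_eq_true, beq_iff_eq] at h2
    simp only [List.mem_cons, List.not_mem_nil, or_false]
    tauto
  have he1 : ((['1'] : List Char), true) ∈ qV := by decide
  obtain ⟨Pa, Ps, hPdef⟩ : ∃ Pa Ps, pf expression.toList (['1'], true) = (Pa, Ps) :=
    ⟨_, _, rfl⟩
  have hPmem : ((Pa, Ps) : List Char × Bool) ∈ qV := hPdef ▸ pf_mem _ hpre _ he1
  have hfwd : solveFwd expression.toList 0 none ['1'] true =
      some ((fIdx (scanQ expression.toList (['1'], true))).map (fun m => (0 : Int) + (m : Int)),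
        Pa, Ps) := by
    rw [fwd_none expression.toList hpre _ he1 0, hPdef]
  have hbuild : buildStates expression.toList ['1'] true =
      some (scanQ expression.toList (['1'], true)) := build_eq expression.toList hpre _ he1
  have hgetD : (((['1'], true) :: scanQ expression.toList (['1'], true)).getD
      expression.toList.length ((['1'], true))) = (Pa, Ps) := by
    rw [getD_states, hPdef]
  have hfI := firstI_eq ((['1'], true) :: scanQ expression.toList (['1'], true)) 0
  unfold solve solve_alt
  rw [hfwd, hbuild]
  cases hfi : fIdx (scanQ expression.toList (['1'], true)) with
  | none =>
    -- no (+i) prefix: both sides return false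
    have hfI0 : firstI ((['1'], true) :: scanQ expression.toList (['1'], true)) 0 = none := by
      rw [hfI]
      simp [fIdx, hfi]
    simp only [hgetD, hfI0]
    split_ifs with h1 h2 h3
    · exact (h1.2.2 rfl).elim
    · exact (h1.2.2 rfl).elim
    · rfl
    · rfl
  | some m0 =>
    have hfI1 : firstI ((['1'], true) :: scanQ expression.toList (['1'], true)) 0 =
        some (m0 + 1) := by
      rw [hfI]
      simp [fIdx, hfi]
    simp only [hgetD, hfI1]
    by_cases hP : ((Pa, Ps) : List Char × Bool) = (['1'], false)
    · -- total product is -1 and a (+i) prefix exists: A runs its backward pass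
      rw [Prod.mk.injEq] at hP
      obtain ⟨hPa, hPs⟩ := hP
      subst hPa
      subst hPs
      have hcsne : expression.toList ≠ [] := by
        intro h0
        rw [h0] at hPdef
        simp [pf] at hPdef
      have hn1 := List.length_pos_iff.mpr hcsne
      have hPmem' : pf expression.toList (['1'], true) ∈ qV := pf_mem _ hpre _ he1
      have hqP : qmul (pf expression.toList (['1'], true)) ((['1'], true)) = (['1'], false) := by
        rw [qmul_one _ hPmem', hPdef]
      have hbw := bw expression.toList hpre _ he1 _ he1 hqP
        ((expression.toList.length : Int) - 1) (expression.toList.length - 1)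
        ((0 : Int) + (m0 : Int)) (m0 + 1) (fun _ => by omega) (by omega) (by push_cast; omega)
      rw [if_neg (show ¬(((['1'] : List Char), false) ≠ ((['1'], false) : List Char × Bool)) from
        fun h => h rfl)]
      split_ifs with hc
      · cases hsb : solveBwd expression.toList.reverse
            ((expression.toList.length : Int) - 1) ['1'] true with
        | none => rw [hsb] at hbw; exact hbw
        | some fk => rw [hsb] at hbw; cases fk <;> exact hbw
      · exact absurd ⟨rfl, rfl, (by exact Option.some_ne_none _)⟩ hc
    · -- total product is not -1: both sides return false
      split_ifs with h1 <;>
        first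
          | rfl
          | exact absurd (Prod.ext h1.1 h1.2.1) hP

-- ===== VERDICT (by name: the statement is the Claim_ definition above) =====
theorem solve_spec : Claim_equal_solve := by
  intro expression _ hpre
  exact solve_spec_aux expression hpre
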